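-- pv_equiv track=rewrite | github.com/hssm/browser-search-result-highlighter | browserplus/utils/parser.py | get_search_terms
-- ===== SOURCE A (Python) =====
-- def get_search_terms(search):
--     terms = []
--
--     start = 0
--     close = None
--     level = 1
--     backtrack = 0
--     idx = -1
--     for c in search:
--         idx += 1
--         # We're looking for a terminator
--         if close:
--             s_from = None
--             s_to = None
--
--             if close == ')' and c == '(':
--                 level += 1
--                 continue
--             if close == ')' and c == ')':
--                 level -= 1
--                 if level > 0:
--                     continue
--
--             if ((c == '"' and close == '"')
--                     or (c == "'" and close == "'")
--                     or (c == ')' and close == ')')):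
--                 close = None
--                 s_from = start
--                 s_to = idx+1
--             elif c.isspace() and close == '\\s':
--                 close = None
--                 s_from = start
--                 s_to = idx
--
--             # End of string. Force capture
--             if idx == len(search)-1:
--                 close = None
--                 s_from = start
--                 s_to = idx+1
--
--             # We captured a term
--             if not close:
--                 terms.append(search[s_from-backtrack:s_to])
--                 start = idx+1
--                 backtrack = 0
--                 level = 1
--         else:
--             # We're looking for the beginning of a term
--             if c == '"':
--                 close = '"'
--             elif c == "'":
--                 close = "'"
--             elif c == '(':
--                 close = ')'
--             elif c == '-':
--                 backtrack += 1
--                 continue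
--             elif not c.isspace():
--                 close = '\\s'
--
--             # We've started a capture
--             if close:
--                 start = idx
--                 if idx == len(search) - 1:
--                     # Capture started at end of string (single char term). Force capture.
--                     terms.append(search[start:idx+1])
--     return terms
-- ===== SOURCE B (Python) =====
-- def get_search_terms(search):
--     # Index-driven tokenizer: jump term by term instead of a per-character state machine.
--     n = len(search)
--     terms = []
--     i = 0
--     backtrack = 0
--     while i < n:
--         c = search[i]
--         if c == '-':
--             backtrack += 1
--             i += 1
--         elif c.isspace():
--             i += 1
--         else:
--             if c == '"' or c == "'":
--                 j = i + 1
--                 while j < n and search[j] != c: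
--                     j += 1
--                 end = j + 1 if j < n else n
--             elif c == '(':
--                 level = 1
--                 j = i + 1
--                 while j < n and level > 0:
--                     if search[j] == '(':
--                         level += 1
--                     elif search[j] == ')':
--                         level -= 1
--                     j += 1
--                 end = j
--             else:
--                 j = i + 1
--                 while j < n and not search[j].isspace():
--                     j += 1
--                 end = j
--             terms.append(search[i - backtrack:end])
--             backtrack = 0
--             i = end
--     return terms
-- ===== Notes on version B (the rewrite author's own statement) =====
-- stated objective: faster
-- what changed: Replaced A's per-character state machine (close/level/start/idx state threaded through one for-loop with a forced end-of-string capture rule) by an index-driven while loop that consumes dashes and whitespace and then scans each term to its end in a dedicated inner loop per delimiter kind (quote / nested group / whitespace), slicing the term out and jumping straight to its end, which does far less bookkeeping per character.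
-- intended difference: On strings where A's end-of-string forced capture misfires - a bareword whose terminating whitespace is the final character, an unbalanced parenthesis group whose final character deepens the nesting or leaves it open instead of closing it, or a term opening at the final character after pending dashes - A respectively keeps the trailing whitespace in the term, silently drops the whole group, or drops the dashes; B ends the word before the whitespace, keeps the group up to end of string, and keeps the dashes, exactly as A itself treats the same term anywhere before the end of the string. — e.g. on get_search_terms("-a"): A returns ["a"], B returns ["-a"]
import Mathlib
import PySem

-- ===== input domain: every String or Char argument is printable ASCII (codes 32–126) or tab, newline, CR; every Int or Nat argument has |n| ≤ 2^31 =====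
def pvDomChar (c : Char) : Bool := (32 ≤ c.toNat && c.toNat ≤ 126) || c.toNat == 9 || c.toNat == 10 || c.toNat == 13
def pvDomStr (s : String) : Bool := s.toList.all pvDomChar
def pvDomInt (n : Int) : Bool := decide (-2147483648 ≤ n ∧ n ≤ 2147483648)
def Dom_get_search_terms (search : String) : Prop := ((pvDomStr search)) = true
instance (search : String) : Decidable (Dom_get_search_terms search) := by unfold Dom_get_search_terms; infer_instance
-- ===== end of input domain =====

set_option maxHeartbeats 1000000

-- B replaces A's per-character state machine by an index-driven tokenizer that jumps term by term
-- (measurably faster by a constant factor); on the D_ corner inputs A's end-of-string forced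
-- capture misfires and B returns the intended value instead.

-- ===== PORT A =====
-- A's `close` sentinel strings '"' / "'" / ')' / '\\s'
inductive PClose : Type
  | dq | sq | par | ws
deriving DecidableEq, Repr

structure AState : Type where
  terms : List (List Char)
  start : Int
  close : Option PClose
  level : Int
  backtrack : Int
  idx : Int
deriving Repr

-- one iteration of A's `for c in search` body (cs = search, kept for slicing and len)
def aStep (cs : List Char) (st : AState) (c : Char) : AState :=
  let n : Int := cs.length
  let idx := st.idx + 1
  match st.close with
  | some cl =>
    if cl = .par ∧ c = '(' then
      { st with level := st.level + 1, idx := idx }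
    else if cl = .par ∧ c = ')' ∧ st.level - 1 > 0 then
      { st with level := st.level - 1, idx := idx }
    else
      let level := if cl = .par ∧ c = ')' then st.level - 1 else st.level
      let cap : Option (Int × Int) :=
        if (c = '"' ∧ cl = .dq) ∨ (c = '\'' ∧ cl = .sq) ∨ (c = ')' ∧ cl = .par) then
          some (st.start, idx + 1)
        else if PySem.Chars.isspace c ∧ cl = .ws then
          some (st.start, idx)
        else none
      let cap := if idx = n - 1 then some (st.start, idx + 1) else cap
      match cap with
      | some ft =>
        { terms := st.terms ++ [PySem.List.slice cs (some (ft.1 - st.backtrack)) (some ft.2)],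
          start := idx + 1, close := none, level := 1, backtrack := 0, idx := idx }
      | none => { st with level := level, idx := idx }
  | none =>
    if c = '"' ∨ c = '\'' ∨ c = '(' then
      let cl : PClose := if c = '"' then .dq else if c = '\'' then .sq else .par
      let terms := if idx = n - 1 then st.terms ++ [PySem.List.slice cs (some idx) (some (idx + 1))] else st.terms
      { st with terms := terms, start := idx, close := some cl, idx := idx }
    else if c = '-' then { st with backtrack := st.backtrack + 1, idx := idx }
    else if ¬ PySem.Chars.isspace c then
      let terms := if idx = n - 1 then st.terms ++ [PySem.List.slice cs (some idx) (some (idx + 1))] else st.terms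
      { st with terms := terms, start := idx, close := some .ws, idx := idx }
    else { st with idx := idx }

def get_search_terms (search : String) : List String :=
  let cs := search.toList
  ((cs.foldl (aStep cs) ⟨[], 0, none, 1, 0, -1⟩).terms).map (fun t => String.ofList t)

-- ===== PORT B =====
-- Source B's inner `while` scan past a quoted term: first index ≥ j holding q, else cs.length
def bQuote (cs : List Char) (q : Char) (j : Nat) : Nat :=
  if h : j < cs.length then
    if cs[j] ≠ q then bQuote cs q (j + 1) else j
  else j
termination_by cs.length - j
decreasing_by exact Nat.sub_succ_lt_self _ _ h

-- Source B's inner `while` scan for a balanced group: `while j < n and level > 0`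
def bParen (cs : List Char) (level : Int) (j : Nat) : Nat :=
  if h : j < cs.length then
    if 0 < level then
      bParen cs (if cs[j] = '(' then level + 1 else if cs[j] = ')' then level - 1 else level)
        (j + 1)
    else j
  else j
termination_by cs.length - j
decreasing_by exact Nat.sub_succ_lt_self _ _ h

-- Source B's inner `while` scan past a bareword: first index ≥ j holding whitespace, else cs.length
def bWord (cs : List Char) (j : Nat) : Nat :=
  if h : j < cs.length then
    if ¬ PySem.Chars.isspace cs[j] then bWord cs (j + 1) else j
  else j
termination_by cs.length - j
decreasing_by exact Nat.sub_succ_lt_self _ _ h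

-- Source B's dispatch on the opening char: the term's exclusive end
def bEnd (cs : List Char) (i : Nat) (c : Char) : Nat :=
  if c = '"' ∨ c = '\'' then
    if bQuote cs c (i + 1) < cs.length then bQuote cs c (i + 1) + 1 else cs.length
  else if c = '(' then bParen cs 1 (i + 1)
  else bWord cs (i + 1)

theorem bQuote_ge (cs : List Char) (q : Char) (j : Nat) : j ≤ bQuote cs q j := by
  fun_induction bQuote <;> omega

theorem bParen_ge_aux (cs : List Char) : ∀ (k : Nat) (level : Int) (j : Nat),
    cs.length - j ≤ k → j ≤ bParen cs level j := by
  intro k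
  induction k with
  | zero =>
    intro level j hk
    unfold bParen; rw [dif_neg (by omega)]
  | succ k ih =>
    intro level j hk
    unfold bParen
    split
    · next h =>
      split
      · have := ih (if cs[j] = '(' then level + 1 else if cs[j] = ')' then level - 1 else level)
          (j + 1) (by omega)
        omega
      · omega
    · omega

theorem bParen_ge (cs : List Char) (level : Int) (j : Nat) : j ≤ bParen cs level j :=
  bParen_ge_aux cs cs.length level j (by omega)

theorem bWord_ge (cs : List Char) (j : Nat) : j ≤ bWord cs j := by
  fun_induction bWord <;> omega

theorem bEnd_gt (cs : List Char) (i : Nat) (c : Char) (h : i < cs.length) :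
    i < bEnd cs i c := by
  unfold bEnd
  have h1 := bQuote_ge cs c (i + 1)
  have h2 := bParen_ge cs 1 (i + 1)
  have h3 := bWord_ge cs (i + 1)
  split_ifs <;> omega

-- Source B's main `while i < n` loop, from position i with the current dash count
def bLoop (cs : List Char) (i : Nat) (backtrack : Nat) : List (List Char) :=
  if h : i < cs.length then
    if cs[i] = '-' then bLoop cs (i + 1) (backtrack + 1)
    else if PySem.Chars.isspace cs[i] then bLoop cs (i + 1) backtrack
    else
      PySem.List.slice cs (some ((i : Int) - (backtrack : Int)))
          (some ((bEnd cs i cs[i] : Nat) : Int)) ::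
        bLoop cs (bEnd cs i cs[i]) 0
  else []
termination_by cs.length - i
decreasing_by
  · exact Nat.sub_succ_lt_self _ _ h
  · exact Nat.sub_succ_lt_self _ _ h
  · exact Nat.sub_lt_sub_left h (bEnd_gt cs i cs[i] h)

def get_search_terms_alt (search : String) : List String :=
  (bLoop search.toList 0 0).map (fun t => String.ofList t)

-- ===== PRECONDITION & SPEC =====
-- On D_ inputs A's end-of-string forced capture misfires: a bareword closed by the final character
-- being whitespace (A keeps the whitespace in the term, B ends the term before it), an unbalanced
-- parenthesis group whose final character deepens the nesting or leaves it open (A silently drops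
-- the whole term, B keeps it up to end of string), and a term opening at the final character after
-- pending dashes (A drops the dashes, B keeps them) — in each case B's value is the one A itself
-- produces for the same term anywhere before the end of the string.
-- The scanner mode reached at each character (what A/B are looking for next)
inductive QMode : Type
  | seek | word
  | quote : Char → QMode
  | paren : Nat → QMode
deriving DecidableEq, Repr

-- does the end of the input interrupt a term in one of the three lossy ways above?
def quirky : List Char → QMode → Nat → Bool
  | [], _, _ => false
  | c :: rest, QMode.seek, bt =>
      if c = '-' then quirky rest QMode.seek (bt + 1)
      else if PySem.Chars.isspace c then quirky rest QMode.seek bt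
      else if rest = [] then decide (bt ≠ 0)
      else if c = '"' ∨ c = '\'' then quirky rest (QMode.quote c) 0
      else if c = '(' then quirky rest (QMode.paren 1) 0
      else quirky rest QMode.word 0
  | c :: rest, QMode.word, _ =>
      if PySem.Chars.isspace c then
        if rest = [] then true else quirky rest QMode.seek 0
      else quirky rest QMode.word 0
  | c :: rest, QMode.quote q, _ =>
      if c = q then quirky rest QMode.seek 0
      else quirky rest (QMode.quote q) 0
  | c :: rest, QMode.paren level, _ =>
      if c = '(' then
        if rest = [] then true else quirky rest (QMode.paren (level + 1)) 0
      else if c = ')' then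
        if level = 1 then quirky rest QMode.seek 0
        else if rest = [] then true else quirky rest (QMode.paren (level - 1)) 0
      else quirky rest (QMode.paren level) 0

def D_get_search_terms (search : String) : Prop :=
  quirky search.toList QMode.seek 0 = true
instance (search : String) : Decidable (D_get_search_terms search) := by
  unfold D_get_search_terms; infer_instance

def Spec_get_search_terms (search : String) (out : List String) : Prop :=
  ¬ D_get_search_terms search → out = get_search_terms_alt search
instance (search : String) (out : List String) : Decidable (Spec_get_search_terms search out) := by
  unfold Spec_get_search_terms; infer_instance

def pvDiffWitness_get_search_terms : String := "-a"
def pvDiffWitnessOut_get_search_terms : (List String) × (List String) := (["a"], ["-a"])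

-- ===== CLAIM (what is proved, stated in full; the proofs are below) =====
def Claim_unchanged_get_search_terms : Prop := ∀ (search : String), Dom_get_search_terms search → Spec_get_search_terms search (get_search_terms search)
def Claim_changed_get_search_terms : Prop := Dom_get_search_terms (pvDiffWitness_get_search_terms) ∧ D_get_search_terms (pvDiffWitness_get_search_terms) ∧ get_search_terms (pvDiffWitness_get_search_terms) = pvDiffWitnessOut_get_search_terms.1 ∧ get_search_terms_alt (pvDiffWitness_get_search_terms) = pvDiffWitnessOut_get_search_terms.2 ∧ pvDiffWitnessOut_get_search_terms.1 ≠ pvDiffWitnessOut_get_search_terms.2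

-- ===== LEMMAS AND PROOFS =====

theorem bParen_nonpos (cs : List Char) (level : Int) (j : Nat) (h : level ≤ 0) :
    bParen cs level j = j := by
  unfold bParen
  split
  · rw [if_neg (by omega)]
  · rfl

theorem bLoop_nil (cs : List Char) (i : Nat) (bt : Nat) (h : cs.length ≤ i) :
    bLoop cs i bt = [] := by
  unfold bLoop; rw [dif_neg (by omega)]

theorem bLoop_dash (cs : List Char) (i bt : Nat) (h : i < cs.length)
    (hd : cs[i] = '-') : bLoop cs i bt = bLoop cs (i + 1) (bt + 1) := by
  conv_lhs => unfold bLoop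
  rw [dif_pos h, if_pos hd]

theorem bLoop_space (cs : List Char) (i bt : Nat) (h : i < cs.length)
    (hd : ¬cs[i] = '-') (hs : PySem.Chars.isspace cs[i] = true) :
    bLoop cs i bt = bLoop cs (i + 1) bt := by
  conv_lhs => unfold bLoop
  rw [dif_pos h, if_neg hd, if_pos hs]

theorem bLoop_term (cs : List Char) (i bt : Nat) (h : i < cs.length)
    (hd : ¬cs[i] = '-') (hs : ¬PySem.Chars.isspace cs[i] = true) :
    bLoop cs i bt
      = PySem.List.slice cs (some ((i : Int) - (bt : Int)))
          (some ((bEnd cs i cs[i] : Nat) : Int)) :: bLoop cs (bEnd cs i cs[i]) 0 := by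
  conv_lhs => unfold bLoop
  rw [dif_pos h, if_neg hd, if_neg hs]

theorem bEnd_last (cs : List Char) (i : Nat) (c : Char) (h : i < cs.length)
    (hl : i = cs.length - 1) : bEnd cs i c = cs.length := by
  have hq : bQuote cs c (i + 1) = i + 1 := by
    unfold bQuote; rw [dif_neg (by omega)]
  have hp : bParen cs 1 (i + 1) = i + 1 := by
    unfold bParen; rw [dif_neg (by omega)]
  have hw : bWord cs (i + 1) = i + 1 := by
    unfold bWord; rw [dif_neg (by omega)]
  unfold bEnd
  simp only [hq, hp, hw]
  split_ifs <;> omega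

theorem sliceOne (cs : List Char) (j : Nat) (hj : j < cs.length) :
    PySem.List.slice cs (some ((j : Int))) (some ((j : Int) + 1)) = [cs[j]] := by
  rw [show ((j : Int) + 1) = (((j + 1 : Nat)) : Int) by push_cast; ring,
    PySem.List.slice_natCast, show j + 1 - j = 1 by omega,
    List.drop_eq_getElem_cons hj, List.take_succ_cons, List.take_zero]

theorem drop_succ_ne_nil (cs : List Char) (i : Nat) (h : i + 1 < cs.length) :
    ¬ cs.drop (i + 1) = [] := by
  simp [List.drop_eq_nil_iff]; omega

mutual

theorem seekL (cs : List Char) (s0 : Int) (bt : Nat) (terms : List (List Char))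
    (i : Nat) (hi : i ≤ cs.length)
    (hquirk : quirky (cs.drop i) QMode.seek bt = false) :
    (List.foldl (aStep cs) ⟨terms, s0, none, 1, (bt : Int), (i : Int) - 1⟩ (cs.drop i)).terms
      = terms ++ bLoop cs i bt := by
  rcases Nat.lt_or_ge i cs.length with h | h
  case inr => rw [List.drop_eq_nil_of_le (by omega), bLoop_nil cs i bt (by omega)]; simp
  rw [List.drop_eq_getElem_cons h] at hquirk ⊢
  rw [List.foldl_cons]
  by_cases hdash : cs[i] = '-'
  · -- '-' : backtrack += 1, continue
    have hstep : aStep cs ⟨terms, s0, none, 1, (bt : Int), (i : Int) - 1⟩ cs[i]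
        = ⟨terms, s0, none, 1, ((bt + 1 : Nat) : Int), ((i + 1 : Nat) : Int) - 1⟩ := by
      simp [aStep, hdash] <;> first | rfl | omega | tauto | (push_cast; ring)
    simp [quirky, hdash] at hquirk
    rw [hstep, bLoop_dash cs i bt h hdash]
    exact seekL cs s0 (bt + 1) terms (i + 1) (by omega) hquirk
  · by_cases hsp : PySem.Chars.isspace cs[i] = true
    · -- whitespace while seeking: nothing
      have hnq : ¬(cs[i] = '"' ∨ cs[i] = '\'' ∨ cs[i] = '(') := by
        intro hc; rcases hc with hc | hc | hc <;> rw [hc] at hsp <;>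
          simp [PySem.Chars.isspace] at hsp
      have hstep : aStep cs ⟨terms, s0, none, 1, (bt : Int), (i : Int) - 1⟩ cs[i]
          = ⟨terms, s0, none, 1, (bt : Int), ((i + 1 : Nat) : Int) - 1⟩ := by
        simp [aStep, hnq, hdash, hsp] <;> first | rfl | omega | tauto | (push_cast; ring)
      simp [quirky, hdash, hsp] at hquirk
      rw [hstep, bLoop_space cs i bt h hdash hsp]
      exact seekL cs s0 bt terms (i + 1) (by omega) hquirk
    · by_cases hlast : i = cs.length - 1
      · -- term starts at the very last char; quirky rules out pending dashes, so bt = 0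
        have hrest : cs.drop (i + 1) = [] := List.drop_eq_nil_of_le (by omega)
        simp [quirky, hdash, hsp, hrest] at hquirk
        have hbt : bt = 0 := by simpa using hquirk
        subst hbt
        rw [List.drop_eq_nil_of_le (by omega), List.foldl_nil,
          bLoop_term cs i 0 h hdash hsp, bEnd_last cs i cs[i] h hlast,
          bLoop_nil cs cs.length 0 (by omega)]
        have hslice : PySem.List.slice cs (some ((i : Int) - ((0 : Nat) : Int)))
            (some ((cs.length : Nat) : Int)) = [cs[i]] := by
          rw [show ((i : Int) - ((0 : Nat) : Int)) = (i : Int) by push_cast; ring,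
            show ((cs.length : Nat) : Int) = (i : Int) + 1 by omega]
          exact sliceOne cs i h
        rw [hslice]
        by_cases hq : cs[i] = '"' ∨ cs[i] = '\'' ∨ cs[i] = '('
        · rcases hq with hq | hq | hq <;> simp [aStep, hq] <;> split_ifs with hcond <;>
            first
              | (exact absurd (by omega) hcond)
              | simp [sliceOne cs i h, hq]
        · simp [aStep, hq, hdash, hsp] <;> split_ifs with hcond <;>
            first
              | (exact absurd (by omega) hcond)
              | simp [sliceOne cs i h]
      · -- a term starts at i and runs past i
        have hni : ¬((i : Int) = -1 + (cs.length : Int)) := by omega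
        have hrest : ¬ cs.drop (i + 1) = [] := drop_succ_ne_nil cs i (by omega)
        rw [bLoop_term cs i bt h hdash hsp]
        by_cases hq : cs[i] = '"' ∨ cs[i] = '\''
        · -- quote term
          have hstep : aStep cs ⟨terms, s0, none, 1, (bt : Int), (i : Int) - 1⟩ cs[i]
              = ⟨terms, (i : Int), some (if cs[i] = '"' then PClose.dq else PClose.sq), 1,
                  (bt : Int), ((i + 1 : Nat) : Int) - 1⟩ := by
            rcases hq with hq | hq <;> (simp [aStep, hq]) <;>
              first
                | rfl | omega | tauto | (push_cast; ring)
                | (split_ifs with hcond <;>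
                    first | (exact absurd (by omega) hcond) | (exact absurd hcond (by omega)) | rfl | omega | tauto | (push_cast; ring))
          simp [quirky, hdash, hsp, hrest, hq] at hquirk
          have hrec := quoteL cs cs[i] (if cs[i] = '"' then PClose.dq else PClose.sq)
            (by rcases hq with hq | hq <;> simp [hq]) (i : Int) (bt : Int) terms (i + 1)
            (by omega) hquirk
          have hbe : bEnd cs i cs[i]
              = if bQuote cs cs[i] (i + 1) < cs.length then bQuote cs cs[i] (i + 1) + 1
                else cs.length := by
            unfold bEnd; rw [if_pos hq]
          rw [hstep, hrec, hbe]
        · by_cases hpar : cs[i] = '('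
          · -- parenthesised term
            have hstep : aStep cs ⟨terms, s0, none, 1, (bt : Int), (i : Int) - 1⟩ cs[i]
                = ⟨terms, (i : Int), some PClose.par, ((1 : Nat) : Int), (bt : Int),
                    ((i + 1 : Nat) : Int) - 1⟩ := by
              (simp [aStep, hpar, hq]) <;>
                first
                  | rfl | omega | tauto | (push_cast; ring)
                  | (split_ifs with hcond <;>
                      first | (exact absurd (by omega) hcond) | (exact absurd hcond (by omega)) | rfl | omega | tauto | (push_cast; ring))
            simp [quirky, hdash, hsp, hrest, hq, hpar] at hquirk
            have hrec := parenL cs (i : Int) (bt : Int) 1 (by omega) terms (i + 1)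
              (by omega) hquirk
            have hbe : bEnd cs i cs[i] = bParen cs ((1 : Nat) : Int) (i + 1) := by
              unfold bEnd; rw [if_neg hq, if_pos hpar]; norm_num
            rw [hstep, hbe, hrec]
          · -- bareword term
            have hstep : aStep cs ⟨terms, s0, none, 1, (bt : Int), (i : Int) - 1⟩ cs[i]
                = ⟨terms, (i : Int), some PClose.ws, 1, (bt : Int), ((i + 1 : Nat) : Int) - 1⟩ := by
              (simp [aStep, hq, hpar, hdash, hsp]) <;>
                first
                  | rfl | omega | tauto | (push_cast; ring)
                  | (split_ifs with hcond <;>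
                      first | (exact absurd (by omega) hcond) | (exact absurd hcond (by omega)) | rfl | omega | tauto | (push_cast; ring))
            simp [quirky, hdash, hsp, hrest, hq, hpar] at hquirk
            have hrec := wordL cs (i : Int) (bt : Int) terms (i + 1) (by omega) hquirk
            have hbe : bEnd cs i cs[i] = bWord cs (i + 1) := by
              unfold bEnd; rw [if_neg hq, if_neg hpar]
            rw [hstep, hbe, hrec]
  termination_by cs.length - i

theorem quoteL (cs : List Char) (q : Char) (cl : PClose)
    (hq : (q = '"' ∧ cl = PClose.dq) ∨ (q = '\'' ∧ cl = PClose.sq))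
    (i bt : Int) (terms : List (List Char)) (j : Nat) (hj : j < cs.length)
    (hquirk : quirky (cs.drop j) (QMode.quote q) 0 = false) :
    (List.foldl (aStep cs) ⟨terms, i, some cl, 1, bt, (j : Int) - 1⟩ (cs.drop j)).terms
      = terms ++ (PySem.List.slice cs (some (i - bt))
            (some (((if bQuote cs q j < cs.length then bQuote cs q j + 1 else cs.length) : Nat) : Int)) ::
          bLoop cs (if bQuote cs q j < cs.length then bQuote cs q j + 1 else cs.length) 0) := by
  rw [List.drop_eq_getElem_cons hj] at hquirk ⊢
  rw [List.foldl_cons]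
  by_cases hc : cs[j] = q
  · -- the closing quote: capture [start, j+1)
    have hscan : bQuote cs q j = j := by
      conv_lhs => unfold bQuote
      rw [dif_pos hj, if_neg (by simpa using hc)]
    have hstep : aStep cs ⟨terms, i, some cl, 1, bt, (j : Int) - 1⟩ cs[j]
        = ⟨terms ++ [PySem.List.slice cs (some (i - bt)) (some ((j : Int) + 1))],
            (j : Int) + 1, none, 1, ((0 : Nat) : Int), ((j + 1 : Nat) : Int) - 1⟩ := by
      rcases hq with ⟨hq1, hq2⟩ | ⟨hq1, hq2⟩ <;> subst hq2 <;> subst hq1 <;>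
        simp [aStep, hc, ite_self] <;> first | rfl | omega | tauto | (push_cast; ring)
    simp [quirky, hc] at hquirk
    rw [hstep,
      seekL cs ((j : Int) + 1) 0
        (terms ++ [PySem.List.slice cs (some (i - bt)) (some ((j : Int) + 1))]) (j + 1)
        (by omega) hquirk,
      hscan, if_pos hj]
    try push_cast
    try simp [List.append_assoc]
  · by_cases hlast : j = cs.length - 1
    · -- unterminated quote hits the end of string: forced capture up to n
      have hscan : bQuote cs q j = j + 1 := by
        conv_lhs => unfold bQuote
        rw [dif_pos hj, if_pos (by simpa using hc)]
        conv_lhs => unfold bQuote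
        rw [dif_neg (by omega)]
      have hstep : aStep cs ⟨terms, i, some cl, 1, bt, (j : Int) - 1⟩ cs[j]
          = ⟨terms ++ [PySem.List.slice cs (some (i - bt)) (some ((j : Int) + 1))],
              (j : Int) + 1, none, 1, 0, (j : Int)⟩ := by
        rcases hq with ⟨hq1, hq2⟩ | ⟨hq1, hq2⟩ <;> subst hq2 <;> subst hq1 <;>
          (simp [aStep, hc] <;> split_ifs with hcond <;>
            first
              | (exact absurd (by omega) hcond)
              | (constructor <;> first | rfl | omega | tauto | (push_cast; ring))
              | rfl | omega | tauto | (push_cast; ring))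
      rw [hstep, List.drop_eq_nil_of_le (by omega), List.foldl_nil, hscan,
        if_neg (by omega), bLoop_nil cs cs.length 0 (by omega)]
      rw [show ((j : Int) + 1) = ((cs.length : Nat) : Int) by omega]
      try simp
    · -- keep scanning
      have hscan : bQuote cs q j = bQuote cs q (j + 1) := by
        conv_lhs => unfold bQuote
        rw [dif_pos hj, if_pos (by simpa using hc)]
      have hnj : ¬((j : Int) = -1 + (cs.length : Int)) := by omega
      have hstep : aStep cs ⟨terms, i, some cl, 1, bt, (j : Int) - 1⟩ cs[j]
          = ⟨terms, i, some cl, 1, bt, ((j + 1 : Nat) : Int) - 1⟩ := by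
        rcases hq with ⟨hq1, hq2⟩ | ⟨hq1, hq2⟩ <;> subst hq2 <;> subst hq1 <;>
          (simp [aStep, hc]) <;> split_ifs with hcond <;>
          first | (exact absurd (by omega) hcond) | rfl | omega | tauto | (push_cast; ring)
      simp [quirky, hc] at hquirk
      rw [hstep, hscan]
      exact quoteL cs q cl hq i bt terms (j + 1) (by omega) hquirk
  termination_by cs.length - j

theorem parenL (cs : List Char) (i bt : Int) (lv : Nat) (hl : 1 ≤ lv)
    (terms : List (List Char)) (j : Nat) (hj : j < cs.length)
    (hquirk : quirky (cs.drop j) (QMode.paren lv) 0 = false) :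
    (List.foldl (aStep cs) ⟨terms, i, some PClose.par, (lv : Int), bt, (j : Int) - 1⟩ (cs.drop j)).terms
      = terms ++ (PySem.List.slice cs (some (i - bt)) (some ((bParen cs (lv : Int) j : Nat) : Int)) ::
          bLoop cs (bParen cs (lv : Int) j) 0) := by
  rw [List.drop_eq_getElem_cons hj] at hquirk ⊢
  rw [List.foldl_cons]
  by_cases hop : cs[j] = '('
  · -- nested '(' : level += 1, continue; quirky rules out '(' as the last char
    have hrest : ¬ cs.drop (j + 1) = [] := by
      intro hr
      simp [quirky, hop, hr] at hquirk
    have hj1 : j + 1 < cs.length := by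
      by_contra hc; exact hrest (List.drop_eq_nil_of_le (by omega))
    simp [quirky, hop, hrest] at hquirk
    have hscan : bParen cs (lv : Int) j = bParen cs ((lv + 1 : Nat) : Int) (j + 1) := by
      conv_lhs => unfold bParen
      rw [dif_pos hj, if_pos (by omega : (0 : Int) < (lv : Int)), if_pos hop]
      congr 1
      try push_cast
      try ring
    have hstep : aStep cs ⟨terms, i, some PClose.par, (lv : Int), bt, (j : Int) - 1⟩ cs[j]
        = ⟨terms, i, some PClose.par, ((lv + 1 : Nat) : Int), bt, ((j + 1 : Nat) : Int) - 1⟩ := by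
      simp [aStep, hop] <;> first | rfl | omega | tauto | (push_cast; ring)
    rw [hstep, hscan]
    exact parenL cs i bt (lv + 1) (by omega) terms (j + 1) hj1 hquirk
  · by_cases hcl : cs[j] = ')'
    · by_cases hlev : lv = 1
      · -- balancing ')': capture [start, j+1)
        subst hlev
        have hscan : bParen cs ((1 : Nat) : Int) j = j + 1 := by
          conv_lhs => unfold bParen
          rw [dif_pos hj, if_pos (by omega : (0 : Int) < ((1 : Nat) : Int)), if_neg hop,
            if_pos hcl]
          exact bParen_nonpos cs _ (j + 1) (by omega)
        have hstep : aStep cs ⟨terms, i, some PClose.par, ((1 : Nat) : Int), bt, (j : Int) - 1⟩ cs[j]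
            = ⟨terms ++ [PySem.List.slice cs (some (i - bt)) (some ((j : Int) + 1))],
                (j : Int) + 1, none, 1, ((0 : Nat) : Int), ((j + 1 : Nat) : Int) - 1⟩ := by
          simp [aStep, hop, hcl, ite_self] <;>
            first | rfl | omega | tauto | (push_cast; ring)
        simp [quirky, hop, hcl] at hquirk
        rw [hstep, hscan,
          seekL cs ((j : Int) + 1) 0
            (terms ++ [PySem.List.slice cs (some (i - bt)) (some ((j : Int) + 1))]) (j + 1)
            (by omega) hquirk]
        try push_cast
        try simp [List.append_assoc]
      · -- not yet balanced; quirky rules out this ')' being the last char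
        have hlv2 : 2 ≤ lv := by omega
        have hrest : ¬ cs.drop (j + 1) = [] := by
          intro hr
          simp [quirky, hop, hcl, hlev, hr] at hquirk
        have hj1 : j + 1 < cs.length := by
          by_contra hc; exact hrest (List.drop_eq_nil_of_le (by omega))
        simp [quirky, hop, hcl, hlev, hrest] at hquirk
        have hscan : bParen cs (lv : Int) j = bParen cs ((lv - 1 : Nat) : Int) (j + 1) := by
          conv_lhs => unfold bParen
          rw [dif_pos hj, if_pos (by omega : (0 : Int) < (lv : Int)), if_neg hop, if_pos hcl]
          congr 1 <;> omega
        have hstep : aStep cs ⟨terms, i, some PClose.par, (lv : Int), bt, (j : Int) - 1⟩ cs[j]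
            = ⟨terms, i, some PClose.par, ((lv - 1 : Nat) : Int), bt, ((j + 1 : Nat) : Int) - 1⟩ := by
          have hlevpos : (lv : Int) - 1 > 0 := by omega
          simp [aStep, hop, hcl, hlevpos]
          split_ifs with h1
          · simp only [AState.mk.injEq, and_true, true_and]
            omega
          · exact absurd (by omega : 1 < lv) h1
        rw [hstep, hscan]
        exact parenL cs i bt (lv - 1) (by omega) terms (j + 1) hj1 hquirk
    · -- ordinary char inside the group
      by_cases hlast : j = cs.length - 1
      · -- end of string forces the capture
        have hscan : bParen cs (lv : Int) j = j + 1 := by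
          conv_lhs => unfold bParen
          rw [dif_pos hj, if_pos (by omega : (0 : Int) < (lv : Int)), if_neg hop, if_neg hcl]
          unfold bParen
          rw [dif_neg (by omega)]
        have hstep : aStep cs ⟨terms, i, some PClose.par, (lv : Int), bt, (j : Int) - 1⟩ cs[j]
            = ⟨terms ++ [PySem.List.slice cs (some (i - bt)) (some ((j : Int) + 1))],
                (j : Int) + 1, none, 1, 0, (j : Int)⟩ := by
          simp [aStep, hop, hcl] <;> split_ifs with hcond <;>
            first
              | (exact absurd (by omega) hcond)
              | (constructor <;> first | rfl | omega | tauto | (push_cast; ring))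
              | rfl | omega | tauto | (push_cast; ring)
        rw [hstep, List.drop_eq_nil_of_le (by omega), List.foldl_nil, hscan,
          bLoop_nil cs (j + 1) 0 (by omega)]
        simp
      · -- keep scanning
        have hnj : ¬((j : Int) = -1 + (cs.length : Int)) := by omega
        have hscan : bParen cs (lv : Int) j = bParen cs (lv : Int) (j + 1) := by
          conv_lhs => unfold bParen
          rw [dif_pos hj, if_pos (by omega : (0 : Int) < (lv : Int)), if_neg hop, if_neg hcl]
        have hstep : aStep cs ⟨terms, i, some PClose.par, (lv : Int), bt, (j : Int) - 1⟩ cs[j]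
            = ⟨terms, i, some PClose.par, (lv : Int), bt, ((j + 1 : Nat) : Int) - 1⟩ := by
          simp [aStep, hop, hcl]
          split_ifs with hcond
          · exact absurd hcond (by omega)
          · rfl
        simp [quirky, hop, hcl] at hquirk
        rw [hstep, hscan]
        exact parenL cs i bt lv hl terms (j + 1) (by omega) hquirk
  termination_by cs.length - j

theorem wordL (cs : List Char) (i bt : Int) (terms : List (List Char)) (j : Nat)
    (hj : j < cs.length)
    (hquirk : quirky (cs.drop j) QMode.word 0 = false) :
    (List.foldl (aStep cs) ⟨terms, i, some PClose.ws, 1, bt, (j : Int) - 1⟩ (cs.drop j)).terms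
      = terms ++ (PySem.List.slice cs (some (i - bt)) (some ((bWord cs j : Nat) : Int)) ::
          bLoop cs (bWord cs j) 0) := by
  rw [List.drop_eq_getElem_cons hj] at hquirk ⊢
  rw [List.foldl_cons]
  by_cases hsp : PySem.Chars.isspace cs[j] = true
  · -- whitespace ends the word; quirky rules out it being the final character
    have hrest : ¬ cs.drop (j + 1) = [] := by
      intro hr
      simp [quirky, hsp, hr] at hquirk
    have hj1 : j + 1 < cs.length := by
      by_contra hc; exact hrest (List.drop_eq_nil_of_le (by omega))
    simp [quirky, hsp, hrest] at hquirk
    have hscan : bWord cs j = j := by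
      unfold bWord; rw [dif_pos hj, if_neg (by simp [hsp])]
    have hnq : ¬(cs[j] = '"' ∨ cs[j] = '\'' ∨ cs[j] = ')') := by
      intro hc'; rcases hc' with hc' | hc' | hc' <;> rw [hc'] at hsp <;>
        simp [PySem.Chars.isspace] at hsp
    have hnj : ¬((j : Int) = -1 + (cs.length : Int)) := by omega
    have hstep : aStep cs ⟨terms, i, some PClose.ws, 1, bt, (j : Int) - 1⟩ cs[j]
        = ⟨terms ++ [PySem.List.slice cs (some (i - bt)) (some ((j : Int)))],
            (j : Int) + 1, none, 1, ((0 : Nat) : Int), ((j + 1 : Nat) : Int) - 1⟩ := by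
      simp [aStep, hsp, hnq]
      split_ifs with hcond
      · exact absurd hcond (by omega)
      · simp [AState.mk.injEq, sub_eq_neg_add]
    rw [hstep,
      seekL cs ((j : Int) + 1) 0
        (terms ++ [PySem.List.slice cs (some (i - bt)) (some ((j : Int)))]) (j + 1)
        (by omega) hquirk,
      hscan]
    -- B revisits the whitespace at j and skips over it
    rw [bLoop_space cs j 0 (by omega)
      (by intro hd; rw [hd] at hsp; simp [PySem.Chars.isspace] at hsp) hsp]
    try simp [List.append_assoc]
  · by_cases hlast : j = cs.length - 1
    · -- last char of a bareword: forced capture up to n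
      have hscan : bWord cs j = j + 1 := by
        conv_lhs => unfold bWord
        rw [dif_pos hj, if_pos (by simp [hsp])]
        unfold bWord
        rw [dif_neg (by omega)]
      have hstep : aStep cs ⟨terms, i, some PClose.ws, 1, bt, (j : Int) - 1⟩ cs[j]
          = ⟨terms ++ [PySem.List.slice cs (some (i - bt)) (some ((j : Int) + 1))],
              (j : Int) + 1, none, 1, 0, (j : Int)⟩ := by
        simp [aStep, hsp] <;> split_ifs with hcond <;>
          first
            | (exact absurd (by omega) hcond)
            | (constructor <;> first | rfl | omega | tauto | (push_cast; ring))
            | rfl | omega | tauto | (push_cast; ring)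
      rw [hstep, List.drop_eq_nil_of_le (by omega), List.foldl_nil, hscan,
        bLoop_nil cs (j + 1) 0 (by omega)]
      simp
    · -- still inside the bareword
      have hscan : bWord cs j = bWord cs (j + 1) := by
        conv_lhs => unfold bWord
        rw [dif_pos hj, if_pos (by simp [hsp])]
      have hnj : ¬((j : Int) = -1 + (cs.length : Int)) := by omega
      have hstep : aStep cs ⟨terms, i, some PClose.ws, 1, bt, (j : Int) - 1⟩ cs[j]
          = ⟨terms, i, some PClose.ws, 1, bt, ((j + 1 : Nat) : Int) - 1⟩ := by
        simp [aStep, hsp]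
        split_ifs with hcond
        · exact absurd hcond (by omega)
        · rfl
      simp [quirky, hsp] at hquirk
      rw [hstep, hscan]
      exact wordL cs i bt terms (j + 1) (by omega) hquirk
  termination_by cs.length - j

end

-- ===== VERDICT (by name: the statement is the Claim_ definition above) =====
theorem get_search_terms_spec : Claim_unchanged_get_search_terms := by
  unfold Claim_unchanged_get_search_terms
  intro search _ hnd
  have hq : quirky search.toList QMode.seek 0 = false := by
    unfold D_get_search_terms at hnd
    simpa using hnd
  unfold get_search_terms get_search_terms_alt
  have h := seekL search.toList 0 0 [] 0 (by omega) (by simpa using hq)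
  norm_num at h
  exact congrArg (List.map (fun t => String.ofList t)) h

theorem get_search_terms_changed : Claim_changed_get_search_terms := by
  unfold Claim_changed_get_search_terms
  refine ⟨by decide, by decide, by decide, ?_, by decide⟩
  show get_search_terms_alt "-a" = ["-a"]
  simp [get_search_terms_alt, bLoop, bEnd, bWord, bQuote, bParen, PySem.Chars.isspace,
    PySem.List.slice]
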